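-- pv_equiv track=rewrite | github.com/thanoskaravangelis/pl1-ntua | 3rd Exercise 2020/vaccine.py | isBad
-- ===== SOURCE A (Python) =====
-- def isBad(list) :
--     i=len(list)-1
--     c1=list[i]
--     while list[i] == c1 :
--         i=i-1
--         if i==-1:
--             return False
--
--     c2 = list[i]
--     while list[i] == c2 :
--         i=i-1
--         if i==-1:
--             return False
--
--     c3 = list[i]
--     if c3 == c1:
--         return True;
--
--     while list[i]==c3 :
--         i=i-1
--         if i==-1:
--             return False
--
--     c4 = list[i]
--     if c4==c2 or c4==c1 :
--         return True
--     while list[i]==c4: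
--         i=i-1
--         if i==-1:
--             return False
--     return True
-- ===== SOURCE B (Python) =====
-- def isBad(list):
--     # Run-length values from the tail: runs[0] = list[-1], then each next distinct consecutive value.
--     runs = []
--     for x in reversed(list):
--         if not runs or runs[-1] != x:
--             runs.append(x)
--     n = len(runs)
--     return (n >= 3 and runs[2] == runs[0]) or \
--            (n >= 4 and (runs[3] == runs[0] or runs[3] == runs[1])) or \
--            n >= 5
-- ===== Notes on version B (the rewrite author's own statement) =====
-- stated objective: simpler
-- what changed: A interleaves three skip-loops with embedded returns over a downward index; B builds the list of distinct consecutive run values from the tail in one pass and then decides by a single boolean formula over the first five run values.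
import Mathlib
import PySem

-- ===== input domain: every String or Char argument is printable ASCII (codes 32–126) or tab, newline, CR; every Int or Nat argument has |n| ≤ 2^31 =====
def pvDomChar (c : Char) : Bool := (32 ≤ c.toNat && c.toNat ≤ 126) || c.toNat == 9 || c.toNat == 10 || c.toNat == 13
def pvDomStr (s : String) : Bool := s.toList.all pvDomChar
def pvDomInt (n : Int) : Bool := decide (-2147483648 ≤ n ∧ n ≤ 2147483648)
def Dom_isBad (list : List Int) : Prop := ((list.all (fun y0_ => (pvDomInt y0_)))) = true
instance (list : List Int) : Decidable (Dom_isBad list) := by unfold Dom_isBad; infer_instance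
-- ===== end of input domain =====

-- B replaces A's three interleaved skip-loops (downward index, embedded returns) by one
-- tail-first run-length pass followed by a single boolean decision (objective: simpler).

-- ===== PORT A =====
-- 'while list[i] == c: i -= 1; if i == -1: return False' — none encodes 'return False'.
def pvSkip (l : List Int) (c : Int) : Nat → Option Nat
  | 0 => if PySem.List.pyGet? l (0 : Int) = some c then none else some 0
  | (i+1) => if PySem.List.pyGet? l ((i : Int) + 1) = some c then pvSkip l c i else some (i+1)

def isBad (list : List Int) : Bool :=
  match PySem.List.pyGet? list ((list.length : Int) - 1) with
  | none => false  -- unreachable inside Pre_ (Python raises IndexError on [])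
  | some c1 =>
    match pvSkip list c1 (list.length - 1) with
    | none => false
    | some i1 =>
      let c2 := PySem.List.pyGetD list (i1 : Int) 0
      match pvSkip list c2 i1 with
      | none => false
      | some i2 =>
        let c3 := PySem.List.pyGetD list (i2 : Int) 0
        if c3 = c1 then true
        else
          match pvSkip list c3 i2 with
          | none => false
          | some i3 =>
            let c4 := PySem.List.pyGetD list (i3 : Int) 0
            if c4 = c2 ∨ c4 = c1 then true
            else
              match pvSkip list c4 i3 with
              | none => false
              | some _ => true

-- ===== PORT B =====
-- 'for x in reversed(list): if not runs or runs[-1] != x: runs.append(x)'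
def isBad_alt (list : List Int) : Bool :=
  let runs := list.reverse.foldl
    (fun rs x => if rs = [] ∨ rs.getLast? ≠ some x then rs ++ [x] else rs) []
  let n := runs.length
  (decide (3 ≤ n) && (PySem.List.pyGetD runs (2:Int) 0 == PySem.List.pyGetD runs (0:Int) 0)) ||
  (decide (4 ≤ n) && (PySem.List.pyGetD runs (3:Int) 0 == PySem.List.pyGetD runs (0:Int) 0 ||
                      PySem.List.pyGetD runs (3:Int) 0 == PySem.List.pyGetD runs (1:Int) 0)) ||
  decide (5 ≤ n)

-- ===== PRECONDITION & SPEC =====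
-- Pre_ excludes only the empty list, on which A raises IndexError at its last-element access (B returns False there).
def Pre_isBad (list : List Int) : Prop := list ≠ []
instance (list : List Int) : Decidable (Pre_isBad list) := by unfold Pre_isBad; infer_instance
def pvWitness_isBad : List Int := [1, 2, 1]

def Spec_isBad (list : List Int) (out : Bool) : Prop := out = isBad_alt list
instance (list : List Int) (out : Bool) : Decidable (Spec_isBad list out) := by unfold Spec_isBad; infer_instance

-- ===== CLAIM (what is proved, stated in full; the proofs are below) =====
def Claim_equal_isBad : Prop := ∀ (list : List Int), Dom_isBad list → Pre_isBad list → Spec_isBad list (isBad list)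

-- ===== LEMMAS AND PROOFS =====

-- the suffix-of-reverse counterpart of pvSkip
def pvSkipAux (c : Int) : List Int → Option (List Int)
  | [] => none
  | v :: rest => if v = c then (match rest with | [] => none | _ :: _ => pvSkipAux c rest) else some (v :: rest)

-- distinct consecutive run values
def pvCollect : Option Int → List Int → List Int
  | _, [] => []
  | prev, x :: xs => if prev = some x then pvCollect prev xs else x :: pvCollect (some x) xs

-- the decision over the first five run values
def pvDecide (rv : List Int) : Bool :=
  (decide (3 ≤ rv.length) && (rv[2]?.getD 0 == rv[0]?.getD 0)) ||
  (decide (4 ≤ rv.length) && (rv[3]?.getD 0 == rv[0]?.getD 0 || rv[3]?.getD 0 == rv[1]?.getD 0)) ||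
  decide (5 ≤ rv.length)

lemma pvSkipAux_suffix {c : Int} : ∀ {s s' : List Int}, pvSkipAux c s = some s' → s' <:+ s := by
  intro s
  induction s with
  | nil => intro s' h; simp [pvSkipAux] at h
  | cons v rest ih =>
    intro s' h
    simp only [pvSkipAux] at h
    split at h
    · cases rest with
      | nil => simp at h
      | cons a t => exact (ih h).trans (List.suffix_cons v (a :: t))
    · cases h; exact List.suffix_rfl

lemma pvSkipAux_shape {c : Int} : ∀ {s s' : List Int}, pvSkipAux c s = some s' →
    ∃ v t, s' = v :: t ∧ v ≠ c := by
  intro s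
  induction s with
  | nil => intro s' h; simp [pvSkipAux] at h
  | cons v rest ih =>
    intro s' h
    simp only [pvSkipAux] at h
    split at h
    · cases rest with
      | nil => simp at h
      | cons a t => exact ih h
    · cases h; exact ⟨v, rest, rfl, by assumption⟩

lemma pvCollect_skip (c : Int) : ∀ s : List Int,
    pvCollect (some c) s = (pvSkipAux c s).elim [] (pvCollect none) := by
  intro s
  induction s with
  | nil => simp [pvCollect, pvSkipAux]
  | cons v rest ih =>
    by_cases hv : v = c
    · subst hv
      cases rest with
      | nil => simp [pvCollect, pvSkipAux]
      | cons a t => simpa [pvCollect, pvSkipAux] using ih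
    · simp [pvCollect, pvSkipAux, hv, Ne.symm hv]

-- a nonempty suffix equals the drop at its length offset
lemma pvSuffix_drop {s r : List Int} (h : s <:+ r) : s = r.drop (r.length - s.length) := by
  obtain ⟨t, rfl⟩ := h
  simp

-- the core correspondence: the index loop equals the suffix loop on the reverse
lemma pvSkip_corr (l : List Int) (c : Int) : ∀ i, i < l.length →
    pvSkip l c i = (pvSkipAux c (l.reverse.drop (l.length - 1 - i))).map (fun s => s.length - 1) := by
  intro i
  induction i with
  | zero =>
    intro h
    have h1 : l.length - 1 < l.reverse.length := by simp only [List.length_reverse]; omega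
    have h0 : l.reverse.drop (l.length - 1 - 0) = [l.reverse[l.length - 1]'h1] := by
      simp only [Nat.sub_zero]
      rw [List.drop_eq_getElem_cons h1, List.drop_eq_nil_of_le (by simp only [List.length_reverse]; omega)]
    have hg : l.reverse[l.length - 1]'h1 = l[0]'h := by
      rw [List.getElem_reverse]; congr 1; omega
    simp only [pvSkip, h0, hg, pvSkipAux, PySem.List.pyGet?_zero, List.getElem?_eq_getElem h]
    by_cases hc : l[0] = c
    · simp [hc]
    · simp [hc]
  | succ i ih =>
    intro h
    have hi : i < l.length := by omega
    have hlen : l.length - 1 - (i+1) < l.reverse.length := by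
      simp only [List.length_reverse]; omega
    have hdrop : l.reverse.drop (l.length - 1 - (i+1)) =
        l.reverse[l.length - 1 - (i+1)]'hlen :: l.reverse.drop (l.length - 1 - i) := by
      rw [List.drop_eq_getElem_cons hlen]
      congr 2
      omega
    have hg : l.reverse[l.length - 1 - (i+1)]'hlen = l[i+1]'h := by
      rw [List.getElem_reverse]; congr 1; omega
    have hget : PySem.List.pyGet? l ((i : Int) + 1) = some (l[i+1]'h) := by
      have h2 : ((i : Int) + 1) = ((i + 1 : Nat) : Int) := by push_cast; ring
      rw [h2, PySem.List.pyGet?_natCast, List.getElem?_eq_getElem h]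
    have hne : l.reverse.drop (l.length - 1 - i) ≠ [] := by
      simp only [ne_eq, List.drop_eq_nil_iff, List.length_reverse]; omega
    simp only [pvSkip, hdrop, hg, pvSkipAux, hget]
    by_cases hc : l[i+1] = c
    · obtain ⟨a, t, hd⟩ : ∃ a t, l.reverse.drop (l.length - 1 - i) = a :: t := by
        cases hdd : l.reverse.drop (l.length - 1 - i) with
        | nil => exact absurd hdd hne
        | cons a t => exact ⟨a, t, rfl⟩
      rw [if_pos (by rw [hc]), if_pos hc, ih hi, hd]
    · rw [if_neg (by simpa using hc), if_neg hc]
      have hdl : (l.reverse.drop (l.length - 1 - i)).length = i + 1 := by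
        simp only [List.length_drop, List.length_reverse]; omega
      simp only [Option.map_some, Option.some.injEq, List.length_cons, hdl]
      omega

-- reading the element A's index i = t.length addresses: the head of the suffix v :: t
lemma pvHead_get {l : List Int} {v : Int} {t : List Int} (h : v :: t <:+ l.reverse) :
    l[t.length]? = some v := by
  obtain ⟨pre, hpre⟩ := h
  have hl : l = t.reverse ++ v :: pre.reverse := by
    have h2 := congrArg List.reverse hpre
    simp only [List.reverse_append, List.reverse_cons, List.reverse_reverse, List.append_assoc,
      List.singleton_append] at h2
    exact h2.symm
  rw [hl, List.getElem?_append_right (by simp)]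
  simp

-- one peeled step of A: read the head, skip its run, extend the run-value list
lemma pvChain {l : List Int} {v : Int} {t : List Int} (h : v :: t <:+ l.reverse) :
    PySem.List.pyGetD l ((t.length : Nat) : Int) 0 = v ∧
    pvSkip l v t.length = (pvSkipAux v (v :: t)).map (fun s => s.length - 1) ∧
    pvCollect none (v :: t) = v :: (pvSkipAux v (v :: t)).elim [] (pvCollect none) := by
  have hlen : t.length + 1 ≤ l.length := by
    have := h.length_le; simp only [List.length_cons, List.length_reverse] at this; exact this
  refine ⟨?_, ?_, ?_⟩
  · rw [PySem.List.pyGetD_natCast, List.getD_eq_getElem?_getD, pvHead_get h]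
    rfl
  · rw [pvSkip_corr l v t.length (by omega)]
    have hd := pvSuffix_drop h
    simp only [List.length_cons, List.length_reverse] at hd
    have he : l.length - 1 - t.length = l.reverse.length - (t.length + 1) := by
      simp only [List.length_reverse]; omega
    rw [he]
    simp only [List.length_reverse] at hd ⊢
    rw [← hd]
  · have h1 : pvCollect none (v :: t) = v :: pvCollect (some v) t := by
      simp [pvCollect]
    have h2 : pvCollect (some v) (v :: t) = pvCollect (some v) t := by
      simp [pvCollect]
    rw [h1, ← h2, pvCollect_skip]

-- B's foldl builds pvCollect
lemma pvFoldl_collect : ∀ (s rs : List Int),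
    s.foldl (fun rs x => if rs = [] ∨ rs.getLast? ≠ some x then rs ++ [x] else rs) rs
      = rs ++ pvCollect rs.getLast? s := by
  intro s
  induction s with
  | nil => intro rs; simp [pvCollect]
  | cons x xs ih =>
    intro rs
    by_cases hlast : rs.getLast? = some x
    · have hrs : ¬ (rs = [] ∨ rs.getLast? ≠ some x) := by
        simp only [not_or, not_not, ne_eq]
        refine ⟨fun h0 => by subst h0; simp at hlast, hlast⟩
      simp only [List.foldl_cons]
      rw [if_neg hrs, ih, hlast]
      simp [pvCollect]
    · have hrs : rs = [] ∨ rs.getLast? ≠ some x := by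
        by_cases h0 : rs = []
        · exact Or.inl h0
        · exact Or.inr hlast
      simp only [List.foldl_cons]
      rw [if_pos hrs, ih, List.getLast?_concat]
      simp [pvCollect, hlast]

-- B computes pvDecide of the run-value list
lemma pvAlt_eval (l : List Int) : isBad_alt l = pvDecide (pvCollect none l.reverse) := by
  unfold isBad_alt
  rw [pvFoldl_collect l.reverse []]
  simp only [List.nil_append, List.getLast?_nil, pvDecide]
  norm_num [PySem.List.pyGetD_ofNat', List.getD_eq_getElem?_getD, PySem.List.pyGetD_zero]
  rfl

theorem pv_isBad_spec : ∀ (list : List Int), Pre_isBad list → isBad list = isBad_alt list := by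
  intro l hpre
  rw [pvAlt_eval]
  obtain ⟨c1, t1, hr1⟩ : ∃ c1 t1, l.reverse = c1 :: t1 := by
    cases hr : l.reverse with
    | nil => exact absurd (by simpa using congrArg List.reverse hr) hpre
    | cons a t => exact ⟨a, t, rfl⟩
  have hsuf1 : c1 :: t1 <:+ l.reverse := hr1 ▸ List.suffix_rfl
  have hn : l.length = t1.length + 1 := by
    have := congrArg List.length hr1; simpa using this
  obtain ⟨hget1, hskip1, hcol1⟩ := pvChain hsuf1
  have hc1 : PySem.List.pyGet? l ((l.length : Int) - 1) = some c1 := by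
    have he : (l.length : Int) - 1 = ((t1.length : Nat) : Int) := by rw [hn]; push_cast; ring
    rw [he, PySem.List.pyGet?_natCast, pvHead_get hsuf1]
  have hi1 : l.length - 1 = t1.length := by omega
  rw [hr1, hcol1]
  cases hs2 : pvSkipAux c1 (c1 :: t1) with
  | none =>
    simp only [isBad, hc1, hi1, hskip1, hs2, Option.map_none, Option.elim_none]
    simp [pvDecide]
  | some s2 =>
  obtain ⟨c2, t2, rfl, hne21⟩ := pvSkipAux_shape hs2
  have hsuf2 : c2 :: t2 <:+ l.reverse := (pvSkipAux_suffix hs2).trans hsuf1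
  obtain ⟨hget2, hskip2, hcol2⟩ := pvChain hsuf2
  simp only [isBad, hc1, hi1, hskip1, hs2, Option.map_some, Option.elim_some,
    List.length_cons, Nat.add_sub_cancel, hget2, hskip2, hcol2]
  cases hs3 : pvSkipAux c2 (c2 :: t2) with
  | none =>
    simp only [Option.map_none, Option.elim_none]
    simp [pvDecide]
  | some s3 =>
  obtain ⟨c3, t3, rfl, hne32⟩ := pvSkipAux_shape hs3
  have hsuf3 : c3 :: t3 <:+ l.reverse := (pvSkipAux_suffix hs3).trans hsuf2
  obtain ⟨hget3, hskip3, hcol3⟩ := pvChain hsuf3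
  simp only [Option.map_some, Option.elim_some, List.length_cons, Nat.add_sub_cancel, hget3]
  by_cases h31 : c3 = c1
  · rw [if_pos h31]
    simp [pvDecide, pvCollect, h31]
  rw [if_neg h31]
  simp only [hskip3, hcol3]
  cases hs4 : pvSkipAux c3 (c3 :: t3) with
  | none =>
    simp only [Option.map_none, Option.elim_none]
    simp [pvDecide, h31]
  | some s4 =>
  obtain ⟨c4, t4, rfl, hne43⟩ := pvSkipAux_shape hs4
  have hsuf4 : c4 :: t4 <:+ l.reverse := (pvSkipAux_suffix hs4).trans hsuf3
  obtain ⟨hget4, hskip4, hcol4⟩ := pvChain hsuf4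
  simp only [Option.map_some, Option.elim_some, List.length_cons, Nat.add_sub_cancel, hget4]
  by_cases h4 : c4 = c2 ∨ c4 = c1
  · rw [if_pos h4]
    rcases h4 with h42 | h41
    · simp [pvDecide, pvCollect, h42]
    · simp [pvDecide, pvCollect, h41]
  rw [if_neg h4]
  obtain ⟨h42, h41⟩ := not_or.mp h4
  simp only [hskip4, hcol4]
  cases hs5 : pvSkipAux c4 (c4 :: t4) with
  | none =>
    simp only [Option.map_none, Option.elim_none]
    simp [pvDecide, h31, h41, h42]
  | some s5 =>
  obtain ⟨c5, t5, rfl, _⟩ := pvSkipAux_shape hs5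
  simp only [Option.map_some, Option.elim_some]
  simp [pvDecide, pvCollect]

-- ===== VERDICT (by name: the statement is the Claim_ definition above) =====
theorem isBad_spec : Claim_equal_isBad := by
  intro l _ hpre
  exact pv_isBad_spec l hpre
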